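-- pv_equiv track=rewrite | github.com/nachodall/UBA-FCEN-TDA-AyED3 | Prácticas/Práctica 1/ej10.py | pila
-- ===== SOURCE A (Python) =====
-- memo = {}
--
-- W = [19, 7, 5, 6, 1]
--
-- S = [15, 13, 7, 8, 2]
--
-- def pila(i, k):
--     if i == -1:
--         return 0  # Caso base: Si hemos procesado todas las cajas (i == -1), no podemos apilar más cajas
--
--     if k > S[i]:
--         return pila(i - 1, k)  # Si el peso acumulado supera el soporte de la caja actual, pasamos a la siguiente caja
--
--     if (i, k) not in memo:  # Si el resultado no está memoizado, lo calculamos y lo almacenamos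
--         # Calculamos la cantidad máxima de cajas que se pueden apilar si NO agregamos la caja actual
--         no_agregar = pila(i - 1, k)
--         # Calculamos la cantidad máxima de cajas que se pueden apilar SI agregamos la caja actual
--         agregar = pila(i - 1, k + W[i]) + 1
--         # Tomamos el máximo entre ambas opciones y lo almacenamos en el diccionario de memoización
--         memo[(i, k)] = max(no_agregar, agregar)
--
--     # Devolvemos la cantidad máxima de cajas que se pueden apilar considerando la caja actual y el peso acumulado
--     return memo[(i, k)]
-- ===== SOURCE B (Python) =====
-- W = [19, 7, 5, 6, 1]
--
-- S = [15, 13, 7, 8, 2]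
--
-- def pila(i, k):
--     # Same recurrence as A, as a plain recursion without the memo cache
--     # (the cache stores values of a pure function, so results are identical).
--     if i == -1:
--         return 0
--     if k > S[i]:
--         return pila(i - 1, k)
--     return max(pila(i - 1, k), pila(i - 1, k + W[i]) + 1)
-- ===== Notes on version B (the rewrite author's own statement) =====
-- stated objective: simpler
-- what changed: B replaces A's memoized dynamic programming (global dict cache with lookup/insert logic) by the plain recursive recurrence itself, which is shorter and has no mutable global state; since the memo only caches a pure function the results are identical.
import Mathlib
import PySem

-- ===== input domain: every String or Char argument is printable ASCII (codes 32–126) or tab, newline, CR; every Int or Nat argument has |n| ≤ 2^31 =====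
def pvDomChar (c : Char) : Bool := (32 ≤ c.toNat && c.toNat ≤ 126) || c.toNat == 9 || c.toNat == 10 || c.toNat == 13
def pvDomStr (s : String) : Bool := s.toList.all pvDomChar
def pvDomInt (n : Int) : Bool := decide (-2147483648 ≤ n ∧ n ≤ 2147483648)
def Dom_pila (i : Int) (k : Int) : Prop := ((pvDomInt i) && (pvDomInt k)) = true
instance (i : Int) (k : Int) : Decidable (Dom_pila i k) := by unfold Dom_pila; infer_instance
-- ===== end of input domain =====

-- B drops A's global memo dict (a pure-function cache) and is the plain recurrence:
-- same branches, same values, no mutable state; return values are identical.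
-- (A mutates the module-level `memo` dict across calls; that cache is invisible in
-- the return value, which is all that is claimed here.)

-- ===== PORT A =====
def pvW : List Int := [19, 7, 5, 6, 1]
def pvS : List Int := [15, 13, 7, 8, 2]

-- A with the global memo threaded as explicit state: (result, memo after the call).
def pilaAux : Nat → Int → PySem.Dict (Int × Int) Int → Int × PySem.Dict (Int × Int) Int
  | 0, _, m => (0, m)                                  -- i == -1
  | n+1, k, m =>
    match PySem.List.pyGet? pvS (n : Int) with
    | none => (0, m)                                   -- S[i]: IndexError in Python; outside Pre_pila
    | some s =>
      if k > s then pilaAux n k m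
      else
        match m.get? ((n : Int), k) with
        | some _ => ((m.get? ((n : Int), k)).getD 0, m)            -- return memo[(i,k)]
        | none =>
          let p1 := pilaAux n k m                                  -- no_agregar
          let p2 := pilaAux n (k + (PySem.List.pyGet? pvW (n : Int)).getD 0) p1.2   -- agregar (W[n] in range whenever S[n] is: same length)
          let m' := p2.2.insert ((n : Int), k) (max p1.1 (p2.1 + 1))
          ((m'.get? ((n : Int), k)).getD 0, m')                    -- return memo[(i,k)]

def pila (i : Int) (k : Int) : Int :=
  -- for i < -1 Python recurses down through negative indices into an IndexError; outside Pre_pila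
  if i < -1 then 0 else (pilaAux (i + 1).toNat k PySem.Dict.empty).1

-- ===== PORT B =====
def pilaAltAux : Nat → Int → Int
  | 0, _ => 0                                          -- i == -1
  | n+1, k =>
    match PySem.List.pyGet? pvS (n : Int) with
    | none => 0                                        -- IndexError in Python; outside Pre_pila
    | some s =>
      if k > s then pilaAltAux n k
      else max (pilaAltAux n k) (pilaAltAux n (k + (PySem.List.pyGet? pvW (n : Int)).getD 0) + 1)

def pila_alt (i : Int) (k : Int) : Int :=
  if i < -1 then 0 else pilaAltAux (i + 1).toNat k

-- ===== PRECONDITION & SPEC =====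
-- Pre_pila: Python A raises IndexError for i ≥ 5 and (after recursing down) for i < -1.
def Pre_pila (i : Int) (k : Int) : Prop := -1 ≤ i ∧ i ≤ 4
instance (i : Int) (k : Int) : Decidable (Pre_pila i k) := by unfold Pre_pila; infer_instance
def pvWitness_pila : Int × Int := (4, 0)

def Spec_pila (i : Int) (k : Int) (out : Int) : Prop := out = pila_alt i k
instance (i : Int) (k : Int) (out : Int) : Decidable (Spec_pila i k out) := by unfold Spec_pila; infer_instance

-- ===== CLAIM (what is proved, stated in full; the proofs are below) =====
def Claim_equal_pila : Prop := ∀ (i : Int) (k : Int), Dom_pila i k → Pre_pila i k → Spec_pila i k (pila i k)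

-- ===== LEMMAS AND PROOFS =====

-- The memo only ever stores values of the pure recurrence (= B's function).
def GoodMemo (m : PySem.Dict (Int × Int) Int) : Prop :=
  ∀ (j kk v : Int), m.get? (j, kk) = some v → v = pilaAltAux (j + 1).toNat kk

lemma goodMemo_empty : GoodMemo PySem.Dict.empty := by
  intro j kk v h
  simp [PySem.Dict.get?_empty] at h

lemma pilaAux_eq (n : Nat) : ∀ (k : Int) (m : PySem.Dict (Int × Int) Int), GoodMemo m →
    (pilaAux n k m).1 = pilaAltAux n k ∧ GoodMemo (pilaAux n k m).2 := by
  induction n with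
  | zero => intro k m hm; exact ⟨rfl, hm⟩
  | succ n ih =>
    intro k m hm
    match hS : PySem.List.pyGet? pvS (n : Int) with
    | none => simp [pilaAux, pilaAltAux, hS]; exact hm
    | some s =>
      by_cases hk : k > s
      · simpa [pilaAux, pilaAltAux, hS, hk] using ih k m hm
      · match hmget : m.get? ((n : Int), k) with
        | some v =>
          have hv := hm _ _ _ hmget
          have hcast : ((n : Int) + 1).toNat = n + 1 := by omega
          rw [hcast] at hv
          refine ⟨?_, ?_⟩
          · simp [pilaAux, pilaAltAux, hS, hk, hmget, hv]
          · simpa [pilaAux, hS, hk, hmget] using hm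
        | none =>
          obtain ⟨h1, hg1⟩ := ih k m hm
          obtain ⟨h2, hg2⟩ := ih (k + (PySem.List.pyGet? pvW (n : Int)).getD 0) _ hg1
          have haltEq : pilaAltAux (n + 1) k
              = max (pilaAux n k m).1
                  ((pilaAux n (k + (PySem.List.pyGet? pvW (n : Int)).getD 0) (pilaAux n k m).2).1 + 1) := by
            have h2' := h2
            simp only [PySem.List.pyGet?_natCast] at h2'
            simp [pilaAltAux, hS, hk, h1, h2']
          refine ⟨?_, ?_⟩
          · simp [pilaAux, hS, hk, hmget, PySem.Dict.get?_insert_self, haltEq]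
          · have hstep : (pilaAux (n + 1) k m).2
                = (pilaAux n (k + (PySem.List.pyGet? pvW (n : Int)).getD 0) (pilaAux n k m).2).2.insert
                    ((n : Int), k)
                    (max (pilaAux n k m).1
                      ((pilaAux n (k + (PySem.List.pyGet? pvW (n : Int)).getD 0) (pilaAux n k m).2).1 + 1)) := by
              simp [pilaAux, hS, hk, hmget]
            rw [hstep]
            intro j kk v hv
            by_cases hkey : ((j : Int), kk) = ((n : Int), k)
            · rw [hkey, PySem.Dict.get?_insert_self] at hv
              injection hv with hv
              have hj : j = (n : Int) := congrArg Prod.fst hkey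
              have hkk : kk = k := congrArg Prod.snd hkey
              have hcast : (j + 1).toNat = n + 1 := by omega
              rw [hcast, hkk, haltEq]
              exact hv.symm
            · rw [PySem.Dict.get?_insert_of_ne _ _ hkey] at hv
              exact hg2 _ _ _ hv

-- ===== VERDICT (by name: the statement is the Claim_ definition above) =====
theorem pila_spec : Claim_equal_pila := by
  intro i k _ hpre
  unfold Pre_pila at hpre
  unfold Spec_pila pila pila_alt
  have hni : ¬ i < -1 := by omega
  simp only [hni, if_false]
  exact (pilaAux_eq _ k _ goodMemo_empty).1
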